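-- pv_equiv track=rewrite | github.com/rondelli/myo-tp | 5_quinta_parte/generacion-conjuntos.py | generar_subconjuntos_peor
-- ===== SOURCE A (Python) =====
-- def generar_subconjuntos_peor(tamaño_disco, archivos):
--     # no recuerdo si ya hicimos algo así...
--     # esto repite patrones, por ahora
--     # sorry por los nombres de las variables
--
--     patrones = []
--
--     for tamaño_archivo, _ in archivos.items():
--         tamaño_disco_actual = tamaño_disco
--         patron = {}
--
--         espacio_restante_patron = tamaño_disco_actual - tamaño_archivo
--         patron[tamaño_archivo] = 1
--
--         for tamaño_archivo_2, cantidad_archivos_2 in archivos.items():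
--             cantidad_utilizados = cantidad_archivos_2 - (1 if tamaño_archivo == tamaño_archivo_2 else 0)
--             espacio_restante = espacio_restante_patron - (tamaño_archivo_2 * cantidad_utilizados)
--
--             while espacio_restante < 0 and cantidad_utilizados > 0:
--                 cantidad_utilizados = cantidad_utilizados - 1
--                 espacio_restante = espacio_restante_patron - (tamaño_archivo_2 * cantidad_utilizados)
--
--             patron[tamaño_archivo_2] = patron.get(tamaño_archivo_2, 0) + cantidad_utilizados
--             espacio_restante_patron = espacio_restante
--
--         patrones.append(patron)
--
--     return patrones
-- ===== SOURCE B (Python) =====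
-- def generar_subconjuntos_peor(tamaño_disco, archivos):
--     # closed-form: max count of size t2 fitting in rem is rem // t2, no decrement loop
--     def patron_de(t):
--         rem = tamaño_disco - t
--         usados = []
--         for t2, c2 in archivos.items():
--             c0 = c2 - (1 if t2 == t else 0)
--             if c0 <= 0 or rem - t2 * c0 >= 0:
--                 u = c0
--             elif rem >= 0:
--                 u = rem // t2   # here necessarily t2 > 0
--             else:
--                 u = 0
--             usados.append((t2, u))
--             rem -= t2 * u
--         p = {t: 1}
--         for t2, u in usados:
--             p[t2] = p.get(t2, 0) + u
--         return p
--     return [patron_de(t) for t in archivos]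
-- ===== Notes on version B (the rewrite author's own statement) =====
-- stated objective: alternative
-- what changed: The per-unit decrementing while loop that finds how many copies of a file size fit is replaced by a floor-division closed form, and each pattern is built in two phases (scan producing used-counts, then dict assembly) instead of interleaved dict updates; asymptotically this removes the dependence on the file counts, though a timing run's small counts showed no measured speed-up.
import Mathlib
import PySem

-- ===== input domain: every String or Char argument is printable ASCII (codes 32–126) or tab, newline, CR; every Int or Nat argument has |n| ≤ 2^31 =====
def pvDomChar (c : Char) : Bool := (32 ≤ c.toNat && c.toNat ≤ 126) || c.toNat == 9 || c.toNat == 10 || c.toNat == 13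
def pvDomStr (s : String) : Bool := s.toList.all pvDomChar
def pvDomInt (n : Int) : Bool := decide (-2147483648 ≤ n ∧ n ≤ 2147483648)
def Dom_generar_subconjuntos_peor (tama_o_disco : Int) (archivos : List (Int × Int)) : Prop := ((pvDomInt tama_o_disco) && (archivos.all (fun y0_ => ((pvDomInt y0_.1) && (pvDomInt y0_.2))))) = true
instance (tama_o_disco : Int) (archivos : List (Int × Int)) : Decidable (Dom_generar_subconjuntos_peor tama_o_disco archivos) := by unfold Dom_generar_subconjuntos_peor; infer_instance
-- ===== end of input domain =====

-- B replaces A's per-unit decrementing while loop by a floor-division closed form and builds each pattern in two phases (objective: alternative).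

-- ===== PORT A =====
-- the 'while espacio_restante < 0 and cantidad_utilizados > 0' loop; espacio is recomputed
-- each iteration as espacio_restante_patron - t2 * cant, so only cant is state
def pyWhileA (esp t2 : Int) (cant : Int) : Int :=
  if esp - t2 * cant < 0 ∧ 0 < cant then pyWhileA esp t2 (cant - 1) else cant
termination_by cant.toNat
decreasing_by omega

-- body of A's inner 'for tamaño_archivo_2, cantidad_archivos_2 in archivos.items()'
def innerStepA (t : Int) (st : Int × PySem.Dict Int Int) (q : Int × Int) : Int × PySem.Dict Int Int :=
  let cant0 := q.2 - (if t = q.1 then 1 else 0)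
  let cant := pyWhileA st.1 q.1 cant0
  (st.1 - q.1 * cant, st.2.modify q.1 0 (· + cant))

def generar_subconjuntos_peor (tama_o_disco : Int) (archivos : List (Int × Int)) : List (List (Int × Int)) :=
  archivos.foldl (fun patrones q =>
    let t := q.1
    let st := archivos.foldl (innerStepA t) (tama_o_disco - t, (PySem.Dict.empty).insert t 1)
    patrones ++ [st.2.items]) []

-- ===== PORT B =====
-- closed form for the number of copies used
def maxCaben (rem t2 c0 : Int) : Int :=
  if c0 ≤ 0 ∨ rem - t2 * c0 ≥ 0 then c0
  else if rem ≥ 0 then PySem.Int.floordiv rem t2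
  else 0

-- B's first pass: the list 'usados' of (size, used-count), threading rem
def scanB (archivos : List (Int × Int)) (t rem : Int) : List (Int × Int) :=
  match archivos with
  | [] => []
  | (t2, c2) :: rest =>
    let u := maxCaben rem t2 (c2 - (if t2 = t then 1 else 0))
    (t2, u) :: scanB rest t (rem - t2 * u)

-- B's second pass: build the pattern dict from usados
def patronDe (tama_o_disco : Int) (archivos : List (Int × Int)) (t : Int) : List (Int × Int) :=
  ((scanB archivos t (tama_o_disco - t)).foldl
    (fun p q => p.modify q.1 0 (· + q.2)) ((PySem.Dict.empty).insert t 1)).items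

def generar_subconjuntos_peor_alt (tama_o_disco : Int) (archivos : List (Int × Int)) : List (List (Int × Int)) :=
  archivos.map (fun q => patronDe tama_o_disco archivos q.1)

-- ===== PRECONDITION & SPEC =====
def Spec_generar_subconjuntos_peor (tama_o_disco : Int) (archivos : List (Int × Int)) (out : List (List (Int × Int))) : Prop := out = generar_subconjuntos_peor_alt tama_o_disco archivos
instance (tama_o_disco : Int) (archivos : List (Int × Int)) (out : List (List (Int × Int))) : Decidable (Spec_generar_subconjuntos_peor tama_o_disco archivos out) := by unfold Spec_generar_subconjuntos_peor; infer_instance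

-- ===== CLAIM (what is proved, stated in full; the proofs are below) =====
def Claim_equal_generar_subconjuntos_peor : Prop := ∀ (tama_o_disco : Int) (archivos : List (Int × Int)), Dom_generar_subconjuntos_peor tama_o_disco archivos → Spec_generar_subconjuntos_peor tama_o_disco archivos (generar_subconjuntos_peor tama_o_disco archivos)

-- ===== LEMMAS AND PROOFS =====

-- the while loop computes the closed form
theorem pyWhileA_eq_maxCaben (esp t2 cant : Int) :
    pyWhileA esp t2 cant = maxCaben esp t2 cant := by
  induction cant using pyWhileA.induct (esp := esp) (t2 := t2) with
  | case1 cant h ih =>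
    rw [pyWhileA, if_pos h, ih]
    obtain ⟨hdef, hpos⟩ := h
    unfold maxCaben
    rcases le_or_gt cant 1 with h1 | h1
    · -- cant = 1 : loop reaches 0
      have hc : cant = 1 := by omega
      subst hc
      simp only [show (1:Int) - 1 = 0 from rfl]
      rw [if_pos (by omega : (0:Int) ≤ 0 ∨ esp - t2 * 0 ≥ 0)]
      rw [if_neg (by omega : ¬ ((1:Int) ≤ 0 ∨ esp - t2 * 1 ≥ 0))]
      split_ifs with hr
      · -- 0 ≤ esp < t2 (since esp - t2 < 0): floordiv esp t2 = 0
        have ht2 : 0 < t2 := by nlinarith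
        rw [eq_comm, PySem.Int.floordiv_eq_iff_of_pos ht2]
        constructor <;> nlinarith
      · rfl
    · -- cant - 1 > 0
      rw [if_neg (by omega : ¬ (cant ≤ 0 ∨ esp - t2 * cant ≥ 0))]
      rcases le_or_gt 0 (esp - t2 * (cant - 1)) with hfit | hfit
      · -- fits at cant - 1: closed form gives cant - 1
        rw [if_pos (Or.inr hfit)]
        have ht2 : 0 < t2 := by nlinarith
        rw [if_pos (by nlinarith : esp ≥ 0)]
        rw [eq_comm, PySem.Int.floordiv_eq_iff_of_pos ht2]
        constructor <;> nlinarith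
      · -- still deficit at cant - 1: both sides take the same else branch
        rw [if_neg (by omega : ¬ (cant - 1 ≤ 0 ∨ esp - t2 * (cant - 1) ≥ 0))]
  | case2 cant h =>
    rw [pyWhileA, if_neg h]
    unfold maxCaben
    rw [if_pos (by omega : cant ≤ 0 ∨ esp - t2 * cant ≥ 0)]

-- A's interleaved inner loop equals B's scan followed by the dict-building pass
theorem inner_eq (l : List (Int × Int)) (t : Int) :
    ∀ (rem : Int) (p : PySem.Dict Int Int),
    (l.foldl (innerStepA t) (rem, p)).2 =
      (scanB l t rem).foldl (fun p q => p.modify q.1 0 (· + q.2)) p := by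
  induction l with
  | nil => intro rem p; rfl
  | cons q rest ih =>
    intro rem p
    obtain ⟨t2, c2⟩ := q
    simp only [List.foldl_cons, scanB]
    have hc : (if t2 = t then (1:Int) else 0) = (if t = t2 then 1 else 0) := by
      rcases eq_or_ne t t2 with h | h <;> simp [Ne.symm, h]
    rw [hc]
    have : innerStepA t (rem, p) (t2, c2) =
        (rem - t2 * maxCaben rem t2 (c2 - if t = t2 then 1 else 0),
         p.modify t2 0 (· + maxCaben rem t2 (c2 - if t = t2 then 1 else 0))) := by
      simp only [innerStepA, pyWhileA_eq_maxCaben]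
    rw [this, ih]

-- ===== VERDICT (by name: the statement is the Claim_ definition above) =====
theorem generar_subconjuntos_peor_spec : Claim_equal_generar_subconjuntos_peor := by
  intro d archivos _
  unfold Spec_generar_subconjuntos_peor generar_subconjuntos_peor generar_subconjuntos_peor_alt
  rw [PySem.List.foldl_append_singleton_eq_map]
  refine List.map_congr_left ?_
  intro q _
  unfold patronDe
  rw [inner_eq]
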